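-- pv_equiv track=rewrite | github.com/leehyeonjin99/BOOSTCAMP_AI_3- | 알고리즘/Programmers/더_맵게.py | solution
-- ===== SOURCE A (Python) =====
-- import heapq
--
-- def solution(scoville, K):
--     answer = 0
--     heapq.heapify(scoville)
--     while scoville[0] < K: # heapq는 자동으로 정렬이 된다. 따라서, socville[0] == min(scoville)
--         if len(scoville) == 1:
--             return -1
--         m1 = heapq.heappop(scoville)
--         m2 = heapq.heappop(scoville)
--         heapq.heappush(scoville, m1 + 2 * m2)
--         answer += 1
--     return answer
-- ===== SOURCE B (Python) =====
-- def solution(scoville, K):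
--     # Sorted-list alternative: keep an ascending list, pop the two smallest
--     # from the front, and re-insert the mix at its sorted position.
--     s = sorted(scoville)
--     answer = 0
--     while s[0] < K:
--         if len(s) == 1:
--             return -1
--         m1 = s.pop(0)
--         m2 = s.pop(0)
--         v = m1 + 2 * m2
--         i = 0
--         while i < len(s) and s[i] <= v:
--             i += 1
--         s.insert(i, v)
--         answer += 1
--     return answer
-- ===== Notes on version B (the rewrite author's own statement) =====
-- stated objective: alternative
-- what changed: Replaces the binary heap with a sorted list: sort once, pop the two smallest from the front, and re-insert the mix at its sorted position by a linear scan.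
import Mathlib
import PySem

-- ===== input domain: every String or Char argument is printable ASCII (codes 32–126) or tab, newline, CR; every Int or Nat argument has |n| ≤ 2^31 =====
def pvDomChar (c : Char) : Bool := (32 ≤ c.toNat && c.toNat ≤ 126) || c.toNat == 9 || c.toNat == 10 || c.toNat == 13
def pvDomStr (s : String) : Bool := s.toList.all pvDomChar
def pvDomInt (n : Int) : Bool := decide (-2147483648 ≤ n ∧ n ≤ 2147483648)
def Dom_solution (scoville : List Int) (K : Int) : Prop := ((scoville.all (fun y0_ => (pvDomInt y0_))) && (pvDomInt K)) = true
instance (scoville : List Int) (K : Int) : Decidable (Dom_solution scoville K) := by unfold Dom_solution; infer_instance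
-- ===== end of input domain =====

-- B replaces A's binary heap by a sorted list (sort once, pop two smallest from the
-- front, linear-scan re-insertion). A mutates `scoville` in place (heapifies it) while B
-- sorts a copy; the equivalence proved here is about the RETURN value only.

-- ===== PORT A =====
-- heapq is ported by its contract: the heap is the list of its elements, scoville[0]
-- (the root) is its minimum, heappop removes the minimum, heappush adds an element.
-- Only the return value is observable, which depends only on the heap's multiset.
def solutionLoop (heap : List Int) (K : Int) (answer : Int) : Int :=
  match h1 : PySem.List.min? heap (fun y => y) with
  | none => 0  -- empty heap: scoville[0] raises IndexError in Python; excluded by Pre_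
  | some m1 =>
    if m1 < K then
      if heap.length = 1 then -1
      else
        let rest := heap.erase m1
        match h2 : PySem.List.min? rest (fun y => y) with
        | none => 0  -- unreachable: rest is nonempty here
        | some m2 =>
          solutionLoop (rest.erase m2 ++ [m1 + 2 * m2]) K (answer + 1)
    else answer
termination_by heap.length
decreasing_by
  have hm1 : m1 ∈ heap := PySem.List.min?_mem h1
  have hm2 : m2 ∈ heap.erase m1 := PySem.List.min?_mem h2
  have h1' : heap.length ≠ 1 := by assumption
  have e1 : (heap.erase m1).length = heap.length - 1 := List.length_erase_of_mem hm1
  have e2 : ((heap.erase m1).erase m2).length = (heap.erase m1).length - 1 :=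
    List.length_erase_of_mem hm2
  have hpos : 0 < heap.length := List.length_pos_of_mem hm1
  simp only [List.length_append, List.length_cons, List.length_nil, e2, e1]
  omega

def solution (scoville : List Int) (K : Int) : Int :=
  solutionLoop scoville K 0

-- ===== PORT B =====
-- the inner `while i < len(s) and s[i] <= v` scan + insert, as structural recursion
def insortAlt (v : Int) : List Int → List Int
  | [] => [v]
  | b :: l => if b ≤ v then b :: insortAlt v l else v :: b :: l

theorem insortAlt_length (v : Int) (l : List Int) :
    (insortAlt v l).length = l.length + 1 := by
  induction l with
  | nil => rfl
  | cons b t ih => simp only [insortAlt]; split <;> simp [ih]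

-- (length lemma above the loop: cited by its decreasing_by)
def solutionAltLoop (s : List Int) (K : Int) (answer : Int) : Int :=
  match s with
  | [] => 0  -- empty list: s[0] raises IndexError in Python; excluded by Pre_
  | x :: xs =>
    if x < K then
      match xs with
      | [] => -1
      | y :: ys => solutionAltLoop (insortAlt (x + 2 * y) ys) K (answer + 1)
    else answer
termination_by s.length
decreasing_by
  simp only [insortAlt_length, List.length_cons]; omega

def solution_alt (scoville : List Int) (K : Int) : Int :=
  solutionAltLoop (PySem.List.sorted scoville (fun y => y) false) K 0

-- ===== PRECONDITION & SPEC =====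
-- Pre_ excludes only the empty list, on which A raises IndexError at scoville[0].
def Pre_solution (scoville : List Int) (K : Int) : Prop := scoville ≠ []
instance (scoville : List Int) (K : Int) : Decidable (Pre_solution scoville K) := by
  unfold Pre_solution; infer_instance
def pvWitness_solution : List Int × Int := ([1, 2, 3, 9, 10, 12], 7)
def Spec_solution (scoville : List Int) (K : Int) (out : Int) : Prop := out = solution_alt scoville K
instance (scoville : List Int) (K : Int) (out : Int) : Decidable (Spec_solution scoville K out) := by unfold Spec_solution; infer_instance

-- ===== CLAIM (what is proved, stated in full; the proofs are below) =====
def Claim_equal_solution : Prop := ∀ (scoville : List Int) (K : Int), Dom_solution scoville K → Pre_solution scoville K → Spec_solution scoville K (solution scoville K)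

-- ===== LEMMAS AND PROOFS =====

theorem insortAlt_perm (v : Int) (l : List Int) :
    (insortAlt v l).Perm (v :: l) := by
  induction l with
  | nil => exact List.Perm.refl _
  | cons b t ih =>
    simp only [insortAlt]; split
    · exact ((ih.cons b).trans (List.Perm.swap v b t))
    · exact List.Perm.refl _

theorem mem_insortAlt {v x : Int} {l : List Int} (h : x ∈ insortAlt v l) :
    x = v ∨ x ∈ l := by
  have := (insortAlt_perm v l).mem_iff.mp h
  simpa using this

theorem insortAlt_sorted (v : Int) (l : List Int)
    (h : l.Pairwise (· ≤ ·)) : (insortAlt v l).Pairwise (· ≤ ·) := by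
  induction l with
  | nil => simp [insortAlt]
  | cons b t ih =>
    rcases List.pairwise_cons.mp h with ⟨hb, ht⟩
    simp only [insortAlt]; split
    · rename_i hbv
      refine List.pairwise_cons.mpr ⟨?_, ih ht⟩
      intro x hx
      rcases mem_insortAlt hx with rfl | hx
      · exact hbv
      · exact hb x hx
    · rename_i hbv
      refine List.pairwise_cons.mpr ⟨?_, h⟩
      intro x hx
      rcases List.mem_cons.mp hx with rfl | hx
      · omega
      · exact le_trans (by omega) (hb x hx)

theorem min?_id_perm {l l' : List Int} (h : l.Perm l') :
    PySem.List.min? l (fun y => y) = PySem.List.min? l' (fun y => y) := by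
  cases hl : PySem.List.min? l (fun y => y) with
  | none =>
    have : l = [] := (PySem.List.min?_eq_none_iff _ _).mp hl
    subst this
    have hl' : l' = [] := h.symm.eq_nil
    subst hl'; rfl
  | some m =>
    cases hl' : PySem.List.min? l' (fun y => y) with
    | none =>
      have : l' = [] := (PySem.List.min?_eq_none_iff _ _).mp hl'
      subst this
      have : l = [] := h.eq_nil
      subst this
      simp [hl'] at hl
    | some m' =>
      have hm : m ∈ l := PySem.List.min?_mem hl
      have hm' : m' ∈ l' := PySem.List.min?_mem hl'
      have h1 : m ≤ m' := PySem.List.min?_isMin hl m' (h.symm.subset hm')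
      have h2 : m' ≤ m := PySem.List.min?_isMin hl' m (h.subset hm)
      exact congrArg some (le_antisymm h1 h2)

-- solutionLoop depends only on the multiset of the heap
theorem solutionLoop_perm (n : ℕ) :
    ∀ (l l' : List Int), l.length ≤ n → l.Perm l' →
      ∀ (K ans : Int), solutionLoop l K ans = solutionLoop l' K ans := by
  induction n with
  | zero =>
    intro l l' hn hp K ans
    have : l = [] := List.length_eq_zero_iff.mp (Nat.le_zero.mp hn)
    subst this
    have : l' = [] := hp.symm.eq_nil
    subst this; rfl
  | succ n ih =>
    intro l l' hn hp K ans
    rw [solutionLoop, solutionLoop]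
    rw [min?_id_perm hp]
    cases hm : PySem.List.min? l' (fun y => y) with
    | none => rfl
    | some m1 =>
      simp only []
      by_cases hK : m1 < K
      · simp only [if_pos hK]
        rw [hp.length_eq]
        by_cases hlen : l'.length = 1
        · simp [hlen]
        · simp only [if_neg hlen]
          have hm1l' : m1 ∈ l' := PySem.List.min?_mem hm
          have hm1l : m1 ∈ l := hp.symm.subset hm1l'
          have hpe : (l.erase m1).Perm (l'.erase m1) := hp.erase m1
          rw [min?_id_perm hpe]
          cases hm2 : PySem.List.min? (l'.erase m1) (fun y => y) with
          | none => rfl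
          | some m2 =>
            have hm2m : m2 ∈ l'.erase m1 := PySem.List.min?_mem hm2
            have hpe2 : ((l.erase m1).erase m2).Perm ((l'.erase m1).erase m2) :=
              hpe.erase m2
            have hlen' : ((l.erase m1).erase m2 ++ [m1 + 2 * m2]).length ≤ n := by
              have e1 : (l.erase m1).length = l.length - 1 := List.length_erase_of_mem hm1l
              have hm2l : m2 ∈ l.erase m1 := hpe.symm.subset hm2m
              have e2 : ((l.erase m1).erase m2).length = (l.erase m1).length - 1 :=
                List.length_erase_of_mem hm2l
              have hpos : 0 < l.length := List.length_pos_of_mem hm1l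
              have : l.length ≠ 1 := by rw [hp.length_eq]; exact hlen
              simp only [List.length_append, List.length_cons, List.length_nil, e2, e1]
              omega
            exact ih _ _ hlen' (hpe2.append_right [m1 + 2 * m2]) K (ans + 1)
      · simp [hK]

theorem min?_of_sorted_cons {x : Int} {xs : List Int}
    (h : (x :: xs).Pairwise (· ≤ ·)) :
    PySem.List.min? (x :: xs) (fun y => y) = some x := by
  cases hm : PySem.List.min? (x :: xs) (fun y => y) with
  | none => simp [PySem.List.min?_eq_none_iff] at hm
  | some m =>
    have hmem : m ∈ x :: xs := PySem.List.min?_mem hm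
    have h1 : m ≤ x := PySem.List.min?_isMin hm x (by simp)
    have h2 : x ≤ m := by
      rcases List.mem_cons.mp hmem with rfl | hmem
      · exact le_refl _
      · exact (List.pairwise_cons.mp h).1 m hmem
    have : m = x := le_antisymm h1 h2
    rw [this]

-- on a sorted list, A's loop computes B's loop
theorem solutionLoop_sorted (n : ℕ) :
    ∀ (l : List Int), l.length ≤ n → l.Pairwise (· ≤ ·) →
      ∀ (K ans : Int), solutionLoop l K ans = solutionAltLoop l K ans := by
  induction n with
  | zero =>
    intro l hn _ K ans
    have : l = [] := List.length_eq_zero_iff.mp (Nat.le_zero.mp hn)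
    subst this
    simp [solutionLoop, solutionAltLoop, PySem.List.min?]
  | succ n ih =>
    intro l hn hs K ans
    cases l with
    | nil => simp [solutionLoop, solutionAltLoop, PySem.List.min?]
    | cons x xs =>
      rw [solutionLoop]; rw [solutionAltLoop.eq_def]
      rw [min?_of_sorted_cons hs]
      simp only []
      by_cases hK : x < K
      · simp only [if_pos hK]
        cases xs with
        | nil => simp
        | cons y ys =>
          have hlen : (x :: y :: ys).length ≠ 1 := by simp
          simp only [if_neg hlen]
          rw [List.erase_cons_head]
          have hs' : (y :: ys).Pairwise (· ≤ ·) := (List.pairwise_cons.mp hs).2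
          rw [min?_of_sorted_cons hs']
          simp only [List.erase_cons_head]
          have hperm : (ys ++ [x + 2 * y]).Perm (insortAlt (x + 2 * y) ys) := by
            have h1 : (ys ++ [x + 2 * y]).Perm ((x + 2 * y) :: ys) :=
              List.perm_append_singleton _ _
            exact h1.trans (insortAlt_perm _ _).symm
          rw [solutionLoop_perm (n) _ _ (by simp at hn ⊢; omega) hperm K (ans + 1)]
          exact ih _ (by rw [insortAlt_length]; simp at hn ⊢; omega)
            (insortAlt_sorted _ _ (List.pairwise_cons.mp hs').2) K (ans + 1)
      · simp [hK]

-- ===== VERDICT (by name: the statement is the Claim_ definition above) =====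
theorem solution_spec : Claim_equal_solution := by
  intro scoville K _ _
  unfold Spec_solution solution solution_alt
  have hperm : scoville.Perm (PySem.List.sorted scoville (fun y => y) false) :=
    (PySem.List.sorted_perm scoville (fun y => y) false).symm
  rw [solutionLoop_perm scoville.length _ _ (le_refl _) hperm K 0]
  exact solutionLoop_sorted _ _ hperm.length_eq.ge
    (PySem.List.sorted_pairwise scoville (fun y => y)) K 0
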